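-- pv_equiv track=rewrite | github.com/malaonda222/Python | Esercizi/RECUPERO5/EsercizioMatrici.py | caricoMax
-- ===== SOURCE A (Python) =====
-- def calcolaCarico(matrix: list[list[int]], r: int, c: int):
--     somma_riga = 0
--     somma_colonna = 0
--     for j in range(len(matrix[r])):
--         somma_riga += matrix[r][j]
--     for i in range(len(matrix)):
--         somma_colonna += matrix[i][c]
--
--     k = (somma_riga - somma_colonna)
--     return k
--
-- def caricoMax(matrix: list[list[int]]):
--     righe = len(matrix)
--     colonne = len(matrix[0])
--     max_carico = None
--     max_posizione = (0, 0)
--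
--     for r in range(righe):
--         for c in range(colonne):
--             calcolo = calcolaCarico(matrix, r, c)
--             if max_carico is None or calcolo > max_carico:
--                 max_carico = calcolo
--                 max_posizione = (r, c)
--
--     return max_posizione, max_carico
-- ===== SOURCE B (Python) =====
-- def caricoMax(matrix: list[list[int]]):
--     row_sums = [sum(row) for row in matrix]
--     ncols = len(matrix[0])
--     col_sums = [sum(row[c] for row in matrix) for c in range(ncols)]
--     best = row_sums[0] - col_sums[0]
--     pos = (0, 0)
--     for r, rs in enumerate(row_sums):
--         for c, cs in enumerate(col_sums):
--             k = rs - cs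
--             if k > best:
--                 best = k
--                 pos = (r, c)
--     return pos, best
-- ===== Notes on version B (the rewrite author's own statement) =====
-- stated objective: faster
-- what changed: B precomputes all row sums and all column sums once and then scores each cell by one subtraction, instead of A re-summing the whole row and whole column for every cell.
-- outside the precondition, e.g. on caricoMax([[]]): A returns ((0, 0), None), B raises IndexError
import Mathlib
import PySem

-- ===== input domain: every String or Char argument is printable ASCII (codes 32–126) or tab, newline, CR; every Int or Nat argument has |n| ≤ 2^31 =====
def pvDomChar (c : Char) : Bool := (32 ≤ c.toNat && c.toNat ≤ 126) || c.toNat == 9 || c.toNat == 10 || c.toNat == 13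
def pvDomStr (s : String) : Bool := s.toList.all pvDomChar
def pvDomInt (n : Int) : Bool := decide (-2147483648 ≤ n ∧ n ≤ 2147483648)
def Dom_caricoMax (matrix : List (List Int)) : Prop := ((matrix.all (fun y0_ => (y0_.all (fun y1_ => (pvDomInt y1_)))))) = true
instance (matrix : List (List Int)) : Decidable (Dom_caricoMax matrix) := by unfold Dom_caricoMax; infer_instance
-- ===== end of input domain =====

-- B precomputes all row sums and column sums once (O(R*C)) instead of A's per-cell re-summation (O(R*C*(R+C))).


-- ===== PORT A =====
-- matrix[r][j] / matrix[i][c] are always in range on Pre_ inputs, so the pyGetD defaults are never used there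
def calcolaCarico (matrix : List (List Int)) (r : Int) (c : Int) : Int :=
  let somma_riga : Int :=
    (PySem.List.pyRange 0 ((PySem.List.pyGetD matrix r []).length : Int)).foldl
      (fun s j => s + PySem.List.pyGetD (PySem.List.pyGetD matrix r []) j 0) 0
  let somma_colonna : Int :=
    (PySem.List.pyRange 0 (matrix.length : Int)).foldl
      (fun s i => s + PySem.List.pyGetD (PySem.List.pyGetD matrix i []) c 0) 0
  somma_riga - somma_colonna

def caricoMax (matrix : List (List Int)) : (Int × Int) × Int :=
  let righe : Int := matrix.length
  let colonne : Int := (PySem.List.pyGetD matrix 0 []).length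
  let st :=
    (PySem.List.pyRange 0 righe).foldl (fun st r =>
      (PySem.List.pyRange 0 colonne).foldl (fun st c =>
        let calcolo := calcolaCarico matrix r c
        match st.1 with
        | none => (some calcolo, (r, c))
        | some m => if calcolo > m then (some calcolo, (r, c)) else st) st)
      ((none : Option Int), ((0 : Int), (0 : Int)))
  (st.2, st.1.getD 0)  -- on Pre_ inputs max_carico is some int; the getD default is never used

-- ===== PORT B =====
def caricoMax_alt (matrix : List (List Int)) : (Int × Int) × Int :=
  let rowSums := matrix.map (fun row => row.sum)
  let ncols := (PySem.List.pyGetD matrix 0 []).length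
  let colSums := (PySem.List.pyRange 0 (ncols : Int)).map
      (fun c => (matrix.map (fun row => PySem.List.pyGetD row c 0)).sum)
  let best := PySem.List.pyGetD rowSums 0 0 - PySem.List.pyGetD colSums 0 0
  let st :=
    (PySem.List.enumerate rowSums).foldl (fun st p =>
      (PySem.List.enumerate colSums).foldl (fun st q =>
        let k := p.2 - q.2
        if k > st.1 then (k, (p.1, q.1)) else st) st)
      (best, ((0 : Int), (0 : Int)))
  (st.2, st.1)

-- ===== PRECONDITION & SPEC =====
-- Pre_ excludes exactly the inputs on which Python A does not return an int result: the empty matrix and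
-- matrices with a row shorter than row 0 (IndexError), and matrices whose first row is empty (A returns
-- ((0,0), None), which is not a value of the declared int result type).
def Pre_caricoMax (matrix : List (List Int)) : Prop :=
  matrix ≠ [] ∧ 0 < (matrix.headD []).length ∧ ∀ row ∈ matrix, (matrix.headD []).length ≤ row.length
instance (matrix : List (List Int)) : Decidable (Pre_caricoMax matrix) := by
  unfold Pre_caricoMax; infer_instance
def pvWitness_caricoMax : List (List Int) := [[1, 2], [3, 4]]
def Spec_caricoMax (matrix : List (List Int)) (out : (Int × Int) × Int) : Prop := out = caricoMax_alt matrix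
instance (matrix : List (List Int)) (out : (Int × Int) × Int) : Decidable (Spec_caricoMax matrix out) := by
  unfold Spec_caricoMax; infer_instance

-- ===== CLAIM (what is proved, stated in full; the proofs are below) =====
def Claim_equal_caricoMax : Prop := ∀ (matrix : List (List Int)), Dom_caricoMax matrix → Pre_caricoMax matrix → Spec_caricoMax matrix (caricoMax matrix)

-- ===== LEMMAS AND PROOFS =====

-- the row load and the column load of A, as plain folds
def rv (matrix : List (List Int)) (r : Int) : Int :=
  (PySem.List.pyGetD matrix r []).foldl (· + ·) 0
def cv (matrix : List (List Int)) (c : Int) : Int :=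
  matrix.foldl (fun s row => s + PySem.List.pyGetD row c 0) 0

lemma calc_eq (matrix : List (List Int)) (r c : Int) :
    calcolaCarico matrix r c = rv matrix r - cv matrix c := by
  unfold calcolaCarico rv cv
  rw [PySem.List.foldl_pyRange_zero_pyGetD' (PySem.List.pyGetD matrix r []) 0 (· + ·) 0,
      PySem.List.foldl_pyRange_zero_pyGetD' matrix [] (fun s row => s + PySem.List.pyGetD row c 0) 0]

-- transport of the inner loop through (b, p) ↦ (some b, p)
lemma hom_inner (v : Int → Int → Int) (r : Int) (l : List Int) (b : Int) (p : Int × Int) :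
    l.foldl (fun st c =>
        match st.1 with
        | none => (some (v r c), (r, c))
        | some m => if v r c > m then (some (v r c), (r, c)) else st)
      ((some b : Option Int), p)
    = ((some (l.foldl (fun st c => if v r c > st.1 then (v r c, (r, c)) else st) (b, p)).1 : Option Int),
        (l.foldl (fun st c => if v r c > st.1 then (v r c, (r, c)) else st) (b, p)).2) := by
  induction l generalizing b p with
  | nil => rfl
  | cons c l ih =>
    simp only [List.foldl_cons]
    show l.foldl _ (if v r c > b then (some (v r c), (r, c)) else ((some b : Option Int), p)) = _
    by_cases h : v r c > b
    · rw [if_pos h, if_pos h]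
      exact ih (v r c) (r, c)
    · rw [if_neg h, if_neg h]
      exact ih b p

-- transport of the whole outer loop through (b, p) ↦ (some b, p)
lemma hom_outer (v : Int → Int → Int) (L : List Int) (C : Int) (b : Int) (p : Int × Int) :
    L.foldl (fun st r =>
        (PySem.List.pyRange 0 C).foldl (fun st c =>
          match st.1 with
          | none => (some (v r c), (r, c))
          | some m => if v r c > m then (some (v r c), (r, c)) else st) st)
      ((some b : Option Int), p)
    = ((some (L.foldl (fun st r =>
          (PySem.List.pyRange 0 C).foldl (fun st c =>
            if v r c > st.1 then (v r c, (r, c)) else st) st) (b, p)).1 : Option Int),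
        (L.foldl (fun st r =>
          (PySem.List.pyRange 0 C).foldl (fun st c =>
            if v r c > st.1 then (v r c, (r, c)) else st) st) (b, p)).2) := by
  induction L generalizing b p with
  | nil => rfl
  | cons y L ih =>
    simp only [List.foldl_cons]
    rw [hom_inner v y (PySem.List.pyRange 0 C) b p]
    exact ih _ _

-- the first inner sweep (row 0): A's None seed turns into B's (0,0)-load seed
lemma inner_first (v : Int → Int → Int) (C : Int) (hC : 0 < C) :
    (PySem.List.pyRange 0 C).foldl (fun st c =>
        match st.1 with
        | none => (some (v 0 c), ((0 : Int), c))
        | some m => if v 0 c > m then (some (v 0 c), (0, c)) else st)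
      ((none : Option Int), ((0 : Int), (0 : Int)))
    = ((some ((PySem.List.pyRange 0 C).foldl (fun st c =>
          if v 0 c > st.1 then (v 0 c, ((0 : Int), c)) else st) (v 0 0, ((0 : Int), (0 : Int)))).1 : Option Int),
        ((PySem.List.pyRange 0 C).foldl (fun st c =>
          if v 0 c > st.1 then (v 0 c, ((0 : Int), c)) else st) (v 0 0, ((0 : Int), (0 : Int)))).2) := by
  rw [PySem.List.pyRange_one_cons hC]
  simp only [List.foldl_cons, gt_iff_lt, lt_irrefl, if_false]
  exact hom_inner v 0 (PySem.List.pyRange (0 + 1) C) (v 0 0) ((0 : Int), (0 : Int))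

-- the whole double loop: A's Option-state scan equals B's scan seeded with the (0,0) load
lemma core (v : Int → Int → Int) (R C : Int) (hR : 0 < R) (hC : 0 < C) :
    (PySem.List.pyRange 0 R).foldl (fun st r =>
        (PySem.List.pyRange 0 C).foldl (fun st c =>
          match st.1 with
          | none => (some (v r c), (r, c))
          | some m => if v r c > m then (some (v r c), (r, c)) else st) st)
      ((none : Option Int), ((0 : Int), (0 : Int)))
    = (fun t : Int × (Int × Int) => ((some t.1 : Option Int), t.2))
        ((PySem.List.pyRange 0 R).foldl (fun st r =>
            (PySem.List.pyRange 0 C).foldl (fun st c =>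
              if v r c > st.1 then (v r c, (r, c)) else st) st)
          (v 0 0, ((0 : Int), (0 : Int)))) := by
  rw [PySem.List.pyRange_one_cons hR]
  simp only [List.foldl_cons]
  rw [inner_first v C hC]
  exact hom_outer v (PySem.List.pyRange (0 + 1) R) C _ _

-- B's table entries are A's loads
lemma rowSums_entry (matrix : List (List Int)) (r : Int) (h0 : 0 ≤ r) (h1 : r < (matrix.length : Int)) :
    PySem.List.pyGetD (matrix.map (fun row => row.sum)) r 0 = rv matrix r := by
  have hl : r < ((matrix.map (fun row => row.sum)).length : Int) := by simpa using h1
  rw [PySem.List.pyGetD_eq_getElem _ 0 h0 hl, rv,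
      PySem.List.pyGetD_eq_getElem _ [] h0 h1]
  simp [List.sum_eq_foldl]

lemma colSums_entry (matrix : List (List Int)) (n : Int) (c : Int) (h0 : 0 ≤ c) (h1 : c < n) :
    PySem.List.pyGetD ((PySem.List.pyRange 0 n).map
        (fun c => (matrix.map (fun row => PySem.List.pyGetD row c 0)).sum)) c 0
      = cv matrix c := by
  rw [PySem.List.pyGetD_map_pyRange_of_nonneg _ n c 0 h0 h1, cv,
      PySem.List.foldl_add matrix (fun row => PySem.List.pyGetD row c 0) 0]
  simp

-- ===== VERDICT =====
theorem caricoMax_spec : Claim_equal_caricoMax := by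
  intro matrix _ hpre
  obtain ⟨hne, hc0, -⟩ := hpre
  unfold Spec_caricoMax caricoMax caricoMax_alt
  simp only [calc_eq]
  have hRpos : (0 : Int) < (matrix.length : Int) := by
    have := List.length_pos_iff.mpr hne; exact_mod_cast this
  have hhead : PySem.List.pyGetD matrix 0 [] = matrix.headD [] := by
    cases matrix with
    | nil => simp at hne
    | cons a l => simp [PySem.List.pyGetD_zero_cons]
  have hCpos : (0 : Int) < ((PySem.List.pyGetD matrix 0 []).length : Int) := by
    rw [hhead]; exact_mod_cast hc0
  -- normalise B: enumerate → indexed range loops, then table lookups → loads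
  rw [PySem.List.enumerate_eq_map_pyRange (matrix.map (fun row => row.sum)) 0,
      PySem.List.enumerate_eq_map_pyRange _ 0]
  simp only [List.foldl_map, PySem.List.len_eq, List.length_map, PySem.List.length_pyRange_one]
  rw [PySem.List.foldl_congr_mem _ _
      (fun st r =>
        (PySem.List.pyRange 0 ((((PySem.List.pyGetD matrix 0 []).length : Int) - 0).toNat : Int)).foldl
          (fun st c => if rv matrix r - cv matrix c > st.1 then (rv matrix r - cv matrix c, (r, c)) else st) st) _ ?_]
  · -- both sides are now range loops over the same load table; seed and shape coincide
    have hseed : PySem.List.pyGetD (matrix.map (fun row => row.sum)) 0 0 -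
        PySem.List.pyGetD ((PySem.List.pyRange 0 ((PySem.List.pyGetD matrix 0 []).length : Int)).map
          (fun c => (matrix.map (fun row => PySem.List.pyGetD row c 0)).sum)) 0 0
        = rv matrix 0 - cv matrix 0 := by
      rw [rowSums_entry matrix 0 le_rfl hRpos, colSums_entry matrix _ 0 le_rfl hCpos]
    rw [hseed]
    have hn : ((((PySem.List.pyGetD matrix 0 []).length : Int) - 0).toNat : Int)
        = ((PySem.List.pyGetD matrix 0 []).length : Int) := by omega
    rw [hn]
    rw [core (fun r c => rv matrix r - cv matrix c) (matrix.length : Int)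
        ((PySem.List.pyGetD matrix 0 []).length : Int) hRpos hCpos]
    rfl
  · intro acc r hr
    obtain ⟨hr0, hr1⟩ := PySem.List.mem_pyRange_one.mp hr
    apply PySem.List.foldl_congr_mem
    intro acc2 c hc
    obtain ⟨hc0', hc1⟩ := PySem.List.mem_pyRange_one.mp hc
    rw [rowSums_entry matrix r hr0 hr1]
    rw [colSums_entry matrix _ c hc0' (by omega)]
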